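-- pv_equiv track=rewrite | github.com/ECS129W20/groupComparever1 | ecs129finalproject4.py | kay3
-- ===== SOURCE A (Python) =====
-- def kay1(matrix, acidA, acidB):
--     return (matrix[acidA + 1][acidB + 1])
--
-- def kay2(matrix, sliceSeqA, sliceSeqB):
--     k2 = 1
--
--     for i in range(len(sliceSeqA)):
--         temp = kay1(matrix, sliceSeqA[i], sliceSeqB[i])
--
--         k2 = k2 * temp
--
--     return k2
--
-- def kay3(matrix, seqA, seqB):
--     if len(seqA) <= len(seqB):
--         shorter = seqA
--         longer = seqB
--     else:
--         shorter = seqB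
--         longer = seqA
--
--     k3 = 0
--     counter = 1
--     i = 1
--     s = 0
--     while counter <= min(10, len(shorter)):
--
--         s = 0
--         i = counter
--
--         while i <= len(shorter):
--
--             window = shorter[s:i]
--             j = 0
--
--             while j + len(window) - 1 < len(longer):
--                 k3 = k3 + kay2(matrix, window, longer[j:j + len(window)])
--                 j += 1
--             i += 1
--             s = i - counter
--
--         counter += 1
--
--     return k3
-- ===== SOURCE B (Python) =====
-- def kay3(matrix, seqA, seqB):
--     if len(seqA) <= len(seqB):
--         sh, lo = seqA, seqB
--     else:
--         sh, lo = seqB, seqA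
--     K = min(10, len(sh))
--     total = 0
--     for s in range(len(sh)):
--         for j in range(len(lo)):
--             acc = 1
--             for t in range(min(K, len(sh) - s, len(lo) - j)):
--                 acc = acc * matrix[sh[s + t] + 1][lo[j + t] + 1]
--                 total = total + acc
--     return total
-- ===== Notes on version B (the rewrite author's own statement) =====
-- stated objective: faster
-- what changed: Replaces the length/window/alignment while-loops that re-slice both sequences and recompute each window product from scratch (kay2) by a start-pair scan: for each pair of start positions a single running product is extended one diagonal step at a time, so every window product costs O(1) instead of O(L) and no slices are built.
import Mathlib
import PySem

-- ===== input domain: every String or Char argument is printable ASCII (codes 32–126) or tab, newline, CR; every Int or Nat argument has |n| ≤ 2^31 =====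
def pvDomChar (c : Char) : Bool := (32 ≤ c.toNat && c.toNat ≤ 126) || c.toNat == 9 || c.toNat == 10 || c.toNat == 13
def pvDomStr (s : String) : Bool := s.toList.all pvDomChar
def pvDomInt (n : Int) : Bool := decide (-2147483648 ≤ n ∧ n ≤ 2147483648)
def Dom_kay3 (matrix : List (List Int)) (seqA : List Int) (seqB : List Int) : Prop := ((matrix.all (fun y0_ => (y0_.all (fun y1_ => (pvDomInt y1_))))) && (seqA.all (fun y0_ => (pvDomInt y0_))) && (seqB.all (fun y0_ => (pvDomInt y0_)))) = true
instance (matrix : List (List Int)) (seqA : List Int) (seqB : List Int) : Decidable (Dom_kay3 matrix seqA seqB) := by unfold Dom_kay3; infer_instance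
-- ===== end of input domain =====

-- B replaces A's recompute-each-window-product loops (kay2 on fresh slices) by a start-pair scan
-- that extends one running product along each diagonal, so each window product costs O(1).


-- ===== PORT A =====
-- matrix[acidA+1][acidB+1]; an out-of-range index is a Python IndexError, excluded by Pre_kay3
def kay1 (matrix : List (List Int)) (acidA : Int) (acidB : Int) : Int :=
  PySem.List.pyGetD (PySem.List.pyGetD matrix (acidA + 1) []) (acidB + 1) 0

def kay2 (matrix : List (List Int)) (sliceSeqA : List Int) (sliceSeqB : List Int) : Int :=
  (PySem.List.pyRange 0 (PySem.List.len sliceSeqA) 1).foldl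
    (fun k2 i =>
      k2 * kay1 matrix (PySem.List.pyGetD sliceSeqA i 0) (PySem.List.pyGetD sliceSeqB i 0)) 1

def kay3 (matrix : List (List Int)) (seqA : List Int) (seqB : List Int) : Int :=
  let shorter := if seqA.length ≤ seqB.length then seqA else seqB
  let longer := if seqA.length ≤ seqB.length then seqB else seqA
  -- while counter <= min(10, len(shorter)): counter = 1, 2, …
  (PySem.List.pyRange 1 (min 10 (PySem.List.len shorter) + 1) 1).foldl
    (fun k3 counter =>
      -- while i <= len(shorter); state (k3, s), s = 0 at entry, s = i - counter after each step
      ((PySem.List.pyRange counter (PySem.List.len shorter + 1) 1).foldl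
        (fun (st : Int × Int) i =>
          -- while j + len(window) - 1 < len(longer): j = 0, 1, …  with window = shorter[s:i]
          (((PySem.List.pyRange 0 (PySem.List.len longer - PySem.List.len (PySem.List.slice shorter (some st.2) (some i)) + 1) 1).foldl
              (fun k3 j =>
                k3 + kay2 matrix (PySem.List.slice shorter (some st.2) (some i))
                  (PySem.List.slice longer (some j) (some (j + PySem.List.len (PySem.List.slice shorter (some st.2) (some i)))))) st.1),
           (i + 1) - counter))
        (k3, 0)).1)
    0

-- ===== PORT B =====
def kay3_alt (matrix : List (List Int)) (seqA : List Int) (seqB : List Int) : Int :=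
  let sh := if seqA.length ≤ seqB.length then seqA else seqB
  let lo := if seqA.length ≤ seqB.length then seqB else seqA
  let K := min 10 (PySem.List.len sh)
  (PySem.List.pyRange 0 (PySem.List.len sh) 1).foldl
    (fun total s =>
      (PySem.List.pyRange 0 (PySem.List.len lo) 1).foldl
        (fun total j =>
          ((PySem.List.pyRange 0 (min K (min (PySem.List.len sh - s) (PySem.List.len lo - j))) 1).foldl
            (fun (st : Int × Int) t =>
              let acc := st.1 *
                PySem.List.pyGetD
                  (PySem.List.pyGetD matrix (PySem.List.pyGetD sh (s + t) 0 + 1) [])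
                  (PySem.List.pyGetD lo (j + t) 0 + 1) 0
              (acc, st.2 + acc))
            (1, total)).2)
        total)
    0

-- ===== PRECONDITION & SPEC =====
-- Pre_kay3 = exactly the matrix accesses A performs succeed (Python IndexError otherwise):
-- every element of the shorter sequence (+1) indexes a row of the matrix and every element of
-- the longer sequence (+1) indexes into that row (A looks every such pair up for the windows
-- of length 1 already, so nothing more and nothing less is required).
def Pre_kay3 (matrix : List (List Int)) (seqA : List Int) (seqB : List Int) : Prop :=
  ∀ a ∈ (if seqA.length ≤ seqB.length then seqA else seqB),
    PySem.Raise.InRange matrix.length (a + 1) ∧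
    ∀ b ∈ (if seqA.length ≤ seqB.length then seqB else seqA),
      PySem.Raise.InRange (PySem.List.pyGetD matrix (a + 1) []).length (b + 1)
instance (matrix : List (List Int)) (seqA : List Int) (seqB : List Int) : Decidable (Pre_kay3 matrix seqA seqB) := by unfold Pre_kay3; infer_instance

def pvWitness_kay3 : List (List Int) × List Int × List Int :=
  ([[1, 2, 3], [4, 5, 6], [7, 8, 9]], [0], [0, 1])

def Spec_kay3 (matrix : List (List Int)) (seqA : List Int) (seqB : List Int) (out : Int) : Prop := out = kay3_alt matrix seqA seqB
instance (matrix : List (List Int)) (seqA : List Int) (seqB : List Int) (out : Int) : Decidable (Spec_kay3 matrix seqA seqB out) := by unfold Spec_kay3; infer_instance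

-- ===== CLAIM (what is proved, stated in full; the proofs are below) =====
def Claim_equal_kay3 : Prop := ∀ (matrix : List (List Int)) (seqA : List Int) (seqB : List Int), Dom_kay3 matrix seqA seqB → Pre_kay3 matrix seqA seqB → Spec_kay3 matrix seqA seqB (kay3 matrix seqA seqB)

-- ===== LEMMAS AND PROOFS =====

lemma pv_listsum (f : ℕ → Int) (n : ℕ) :
    ((List.range n).map f).sum = ∑ i ∈ Finset.range n, f i := rfl

-- the single matrix lookup both programs perform for aligned positions s and j
def pvEnt (m : List (List Int)) (sh lo : List Int) (s j : ℕ) : Int :=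
  kay1 m (sh.getD s 0) (lo.getD j 0)

-- the left-to-right product over a window of length L starting at s (shorter) and j (longer)
def pvPP (m : List (List Int)) (sh lo : List Int) (s j L : ℕ) : Int :=
  (List.range L).foldl (fun k t => k * pvEnt m sh lo (s + t) (j + t)) 1

lemma pv_kay2 (m : List (List Int)) (sh lo : List Int) (s j L : ℕ)
    (_hs : s + L ≤ sh.length) (_hj : j + L ≤ lo.length) :
    kay2 m ((sh.drop s).take L)
      (PySem.List.slice lo (some (j : Int)) (some ((j : Int) + (L : Int))))
      = pvPP m sh lo s j L := by
  rw [PySem.List.slice_natCast_add]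
  unfold kay2 pvPP
  have hw : ((sh.drop s).take L).length = L := by
    simp only [List.length_take, List.length_drop]; omega
  simp only [PySem.List.len_eq, hw]
  rw [PySem.List.pyRange_one]
  rw [show ((L : Int) - 0).toNat = L from by omega]
  rw [List.foldl_map]
  refine PySem.List.foldl_congr_mem _ _ _ _ fun acc t ht => ?_
  have htL : t < L := List.mem_range.mp ht
  simp only [zero_add, PySem.List.pyGetD_natCast]
  have e1 : ((sh.drop s).take L).getD t 0 = sh.getD (s + t) 0 := by
    simp [List.getD_eq_getElem?_getD, List.getElem?_drop, htL]
  have e2 : ((lo.drop j).take L).getD t 0 = lo.getD (j + t) 0 := by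
    simp [List.getD_eq_getElem?_getD, List.getElem?_drop, htL]
  rw [e1, e2]
  rfl

-- the middle while-loop's second state component s always equals i - counter
lemma pv_middle (B : Int → Int → ℕ → Int) (M : ℕ) (init : Int) :
    (List.range M).foldl (fun (st : Int × Int) k => (B st.1 st.2 k, (k : Int) + 1)) (init, 0)
      = ((List.range M).foldl (fun (k3 : Int) (k : ℕ) => B k3 (↑k) k) init, (M : Int)) := by
  induction M with
  | zero => simp
  | succ n ih =>
      rw [List.range_succ, List.foldl_append, List.foldl_append, ih,
        List.foldl_cons, List.foldl_cons, List.foldl_nil, List.foldl_nil]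
      norm_cast

-- B's running-product loop: first component is the full product, second accumulates prefixes
lemma pv_run (e : ℕ → Int) (n : ℕ) (tot : Int) :
    (List.range n).foldl (fun (st : Int × Int) t => (st.1 * e t, st.2 + st.1 * e t)) (1, tot)
      = ((List.range n).foldl (fun p t => p * e t) 1,
         tot + ((List.range n).map
           (fun L => (List.range (L + 1)).foldl (fun p t => p * e t) 1)).sum) := by
  induction n with
  | zero => simp
  | succ n ih =>
      rw [List.range_succ, List.foldl_append, ih, List.foldl_cons, List.foldl_nil]
      rw [List.map_append, List.sum_append, List.map_singleton, List.sum_singleton]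
      rw [List.range_succ, List.foldl_append, List.foldl_cons, List.foldl_nil]
      rw [Prod.mk.injEq]
      exact ⟨rfl, by ring⟩

lemma pv_sum_extend (f : ℕ → Int) (n N : ℕ) (h : n ≤ N) :
    ∑ x ∈ Finset.range n, f x = ∑ x ∈ Finset.range N, if x < n then f x else 0 := by
  have h1 : ∑ x ∈ Finset.range n, f x = ∑ x ∈ Finset.range n, if x < n then f x else 0 :=
    Finset.sum_congr rfl fun x hx => (if_pos (Finset.mem_range.mp hx)).symm
  rw [h1]
  exact Finset.sum_subset (Finset.range_subset.mpr fun x hx => Finset.mem_range.mpr (by omega))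
    fun x _ hx => if_neg (by simpa using hx)

-- exchanging the summation orders of A (length outermost) and B (start positions outermost)
lemma pv_exchange (P : ℕ → ℕ → ℕ → Int) (K Nsh Nlo : ℕ) (hK : K ≤ Nsh) :
    ∑ k ∈ Finset.range K, ∑ s ∈ Finset.range (Nsh - k), ∑ j ∈ Finset.range (Nlo - k), P s j k
      = ∑ s ∈ Finset.range Nsh, ∑ j ∈ Finset.range Nlo,
          ∑ k ∈ Finset.range (min K (min (Nsh - s) (Nlo - j))), P s j k := by
  trans (∑ k ∈ Finset.range K, ∑ s ∈ Finset.range Nsh, ∑ j ∈ Finset.range Nlo,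
      if s + k < Nsh ∧ j + k < Nlo then P s j k else 0)
  · refine Finset.sum_congr rfl fun k hk => ?_
    have hkK : k < K := Finset.mem_range.mp hk
    rw [pv_sum_extend _ _ Nsh (by omega)]
    refine Finset.sum_congr rfl fun s _ => ?_
    by_cases hsk : s < Nsh - k
    · rw [if_pos hsk, pv_sum_extend _ _ Nlo (by omega)]
      exact Finset.sum_congr rfl fun j _ => if_congr (by omega) rfl rfl
    · rw [if_neg hsk]
      exact (Finset.sum_eq_zero fun j _ => if_neg (by omega)).symm
  · trans (∑ s ∈ Finset.range Nsh, ∑ j ∈ Finset.range Nlo, ∑ k ∈ Finset.range K,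
        if s + k < Nsh ∧ j + k < Nlo then P s j k else 0)
    · rw [Finset.sum_comm]
      exact Finset.sum_congr rfl fun s _ => Finset.sum_comm
    · refine Finset.sum_congr rfl fun s _ => Finset.sum_congr rfl fun j _ => ?_
      rw [pv_sum_extend _ (min K (min (Nsh - s) (Nlo - j))) K (by omega)]
      refine Finset.sum_congr rfl fun k hk => ?_
      have hkK : k < K := Finset.mem_range.mp hk
      exact if_congr (by omega) rfl rfl

-- A's innermost alignment loop, summed
lemma pvA_inner (m : List (List Int)) (sh lo : List Int) (k t : ℕ)
    (ht : t + (k + 1) ≤ sh.length) (k3 : Int) :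
    (PySem.List.pyRange 0 ((lo.length : Int) - ((((sh.drop t).take (k + 1)).length : ℕ) : Int) + 1) 1).foldl
      (fun k3 j => k3 + kay2 m ((sh.drop t).take (k + 1))
          (PySem.List.slice lo (some j) (some (j + ((((sh.drop t).take (k + 1)).length : ℕ) : Int))))) k3
      = k3 + ∑ j ∈ Finset.range (lo.length - k), pvPP m sh lo t j (k + 1) := by
  have hw : ((sh.drop t).take (k + 1)).length = k + 1 := by
    simp only [List.length_take, List.length_drop]; omega
  simp only [hw]
  rw [PySem.List.pyRange_one]
  rw [show ((lo.length : Int) - ((k + 1 : ℕ) : Int) + 1 - 0).toNat = lo.length - k from by omega]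
  rw [List.foldl_map]
  trans ((List.range (lo.length - k)).foldl (fun acc j => acc + pvPP m sh lo t j (k + 1)) k3)
  · refine PySem.List.foldl_congr_mem _ _ _ _ fun acc j hj => ?_
    have hjn : j < lo.length - k := List.mem_range.mp hj

    simp only [zero_add]
    rw [pv_kay2 m sh lo t j (k + 1) ht (by omega)]
  · rw [PySem.List.foldl_add, pv_listsum]

-- A's middle window loop for a fixed window length k+1, summed
lemma pvA_middle (m : List (List Int)) (sh lo : List Int) (k : ℕ) (hk : k < sh.length) (k3 : Int) :
    ((PySem.List.pyRange (1 + (k : Int)) ((sh.length : Int) + 1) 1).foldl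
      (fun (st : Int × Int) i =>
        (((PySem.List.pyRange 0 ((lo.length : Int) - ((PySem.List.slice sh (some st.2) (some i)).length : Int) + 1) 1).foldl
            (fun k3 j => k3 + kay2 m (PySem.List.slice sh (some st.2) (some i))
                (PySem.List.slice lo (some j) (some (j + ((PySem.List.slice sh (some st.2) (some i)).length : Int))))) st.1),
         (i + 1) - (1 + (k : Int))))
      (k3, 0)).1
    = k3 + ∑ t ∈ Finset.range (sh.length - k), ∑ j ∈ Finset.range (lo.length - k),
        pvPP m sh lo t j (k + 1) := by
  rw [PySem.List.pyRange_one]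
  rw [show ((sh.length : Int) + 1 - (1 + (k : Int))).toNat = sh.length - k from by omega]
  rw [List.foldl_map]
  simp only [show ∀ t : ℕ, (1 + (k : Int) + (t : Int) + 1) - (1 + (k : Int)) = (t : Int) + 1
    from fun t => by ring]
  rw [pv_middle (B := fun k3 s t =>
      (PySem.List.pyRange 0 ((lo.length : Int) - ((PySem.List.slice sh (some s) (some (1 + (k : Int) + (t : Int)))).length : Int) + 1) 1).foldl
        (fun k3 j => k3 + kay2 m (PySem.List.slice sh (some s) (some (1 + (k : Int) + (t : Int))))
            (PySem.List.slice lo (some j) (some (j + ((PySem.List.slice sh (some s) (some (1 + (k : Int) + (t : Int)))).length : Int))))) k3)]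
  dsimp only
  trans ((List.range (sh.length - k)).foldl
      (fun k3 t => k3 + ∑ j ∈ Finset.range (lo.length - k), pvPP m sh lo t j (k + 1)) k3)
  · refine PySem.List.foldl_congr_mem _ _ _ _ fun acc t htm => ?_
    have htn : t < sh.length - k := List.mem_range.mp htm
    rw [show (1 : Int) + (k : Int) + (t : Int) = ((t : ℕ) : Int) + (((k + 1) : ℕ) : Int)
      from by push_cast; ring]
    rw [PySem.List.slice_natCast_add]
    exact pvA_inner m sh lo k t (by omega) acc
  · rw [PySem.List.foldl_add, pv_listsum]

-- the whole of A as a triple sum, window length outermost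
lemma pvA_eval (m : List (List Int)) (sh lo : List Int) :
    (PySem.List.pyRange 1 (min 10 (PySem.List.len sh) + 1) 1).foldl
      (fun k3 counter =>
        ((PySem.List.pyRange counter (PySem.List.len sh + 1) 1).foldl
          (fun (st : Int × Int) i =>
            (((PySem.List.pyRange 0 (PySem.List.len lo - PySem.List.len (PySem.List.slice sh (some st.2) (some i)) + 1) 1).foldl
                (fun k3 j =>
                  k3 + kay2 m (PySem.List.slice sh (some st.2) (some i))
                    (PySem.List.slice lo (some j) (some (j + PySem.List.len (PySem.List.slice sh (some st.2) (some i)))))) st.1),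
             (i + 1) - counter))
          (k3, 0)).1)
      0
    = ∑ k ∈ Finset.range (min 10 sh.length), ∑ t ∈ Finset.range (sh.length - k),
        ∑ j ∈ Finset.range (lo.length - k), pvPP m sh lo t j (k + 1) := by
  simp only [PySem.List.len_eq]
  rw [show (min 10 ((sh.length : ℕ) : Int)) = ((min 10 sh.length : ℕ) : Int) from by omega]
  rw [PySem.List.pyRange_one]
  rw [show (((min 10 sh.length : ℕ) : Int) + 1 - 1).toNat = min 10 sh.length from by omega]
  rw [List.foldl_map]
  trans ((List.range (min 10 sh.length)).foldl
      (fun k3 k => k3 + ∑ t ∈ Finset.range (sh.length - k), ∑ j ∈ Finset.range (lo.length - k),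
        pvPP m sh lo t j (k + 1)) 0)
  · refine PySem.List.foldl_congr_mem _ _ _ _ fun k3 k hk => ?_
    have hkK : k < min 10 sh.length := List.mem_range.mp hk
    exact pvA_middle m sh lo k (by omega) k3
  · rw [PySem.List.foldl_add, pv_listsum, zero_add]

-- the whole of B as a triple sum, start positions outermost
lemma pvB_eval (m : List (List Int)) (sh lo : List Int) :
    (PySem.List.pyRange 0 (PySem.List.len sh) 1).foldl
      (fun total s =>
        (PySem.List.pyRange 0 (PySem.List.len lo) 1).foldl
          (fun total j =>
            ((PySem.List.pyRange 0 (min (min 10 (PySem.List.len sh)) (min (PySem.List.len sh - s) (PySem.List.len lo - j))) 1).foldl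
              (fun (st : Int × Int) t =>
                (st.1 * PySem.List.pyGetD (PySem.List.pyGetD m (PySem.List.pyGetD sh (s + t) 0 + 1) []) (PySem.List.pyGetD lo (j + t) 0 + 1) 0,
                 st.2 + st.1 * PySem.List.pyGetD (PySem.List.pyGetD m (PySem.List.pyGetD sh (s + t) 0 + 1) []) (PySem.List.pyGetD lo (j + t) 0 + 1) 0))
              (1, total)).2)
          total)
      0
    = ∑ s ∈ Finset.range sh.length, ∑ j ∈ Finset.range lo.length,
        ∑ L ∈ Finset.range (min (min 10 sh.length) (min (sh.length - s) (lo.length - j))),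
          pvPP m sh lo s j (L + 1) := by
  simp only [PySem.List.len_eq, PySem.List.pyRange_one, List.foldl_map, zero_add, sub_zero,
    Int.toNat_natCast]
  trans ((List.range sh.length).foldl
      (fun total s => total + ∑ j ∈ Finset.range lo.length,
        ∑ L ∈ Finset.range (min (min 10 sh.length) (min (sh.length - s) (lo.length - j))),
          pvPP m sh lo s j (L + 1)) 0)
  · refine PySem.List.foldl_congr_mem _ _ _ _ fun total s hs => ?_
    have hsN : s < sh.length := List.mem_range.mp hs
    trans ((List.range lo.length).foldl
        (fun total j => total + ∑ L ∈ Finset.range (min (min 10 sh.length) (min (sh.length - s) (lo.length - j))),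
          pvPP m sh lo s j (L + 1)) total)
    · refine PySem.List.foldl_congr_mem _ _ _ _ fun total j hj => ?_
      have hjN : j < lo.length := List.mem_range.mp hj
      rw [show (min (min 10 ((sh.length : ℕ) : Int)) (min (((sh.length : ℕ) : Int) - (s : Int)) (((lo.length : ℕ) : Int) - (j : Int)))).toNat
          = min (min 10 sh.length) (min (sh.length - s) (lo.length - j)) from by omega]
      have hE : ∀ t : ℕ,
          PySem.List.pyGetD (PySem.List.pyGetD m (PySem.List.pyGetD sh ((s : Int) + (t : Int)) 0 + 1) []) (PySem.List.pyGetD lo ((j : Int) + (t : Int)) 0 + 1) 0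
            = pvEnt m sh lo (s + t) (j + t) := by
        intro t
        rw [show (s : Int) + (t : Int) = ((s + t : ℕ) : Int) from by push_cast; ring,
          show (j : Int) + (t : Int) = ((j + t : ℕ) : Int) from by push_cast; ring]
        simp only [PySem.List.pyGetD_natCast]
        rfl
      simp only [hE]
      rw [pv_run (e := fun t => pvEnt m sh lo (s + t) (j + t))]
      dsimp only
      rw [pv_listsum]
      exact congrArg (total + ·) (Finset.sum_congr rfl fun L _ => rfl)
    · rw [PySem.List.foldl_add, pv_listsum]
  · rw [PySem.List.foldl_add, pv_listsum, zero_add]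

-- ===== VERDICT (by name: the statement is the Claim_ definition above) =====
theorem kay3_spec : Claim_equal_kay3 := by
  unfold Claim_equal_kay3
  intro m A B _ _
  unfold Spec_kay3
  simp only [kay3, kay3_alt]
  rw [pvA_eval, pvB_eval]
  exact pv_exchange
    (fun s j k => pvPP m (if A.length ≤ B.length then A else B) (if A.length ≤ B.length then B else A) s j (k + 1))
    (min 10 (if A.length ≤ B.length then A else B).length)
    (if A.length ≤ B.length then A else B).length
    (if A.length ≤ B.length then B else A).length
    (Nat.min_le_right _ _)
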